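-- pv_equiv track=rewrite | github.com/minhducsun2002/aoc2024 | day9/main.py | list_spaces
-- ===== SOURCE A (Python) =====
-- def list_spaces(l: list[str]) -> list[(int, int)]: # start, length
--     out = []
--
--     counter = 0
--     start = -1
--     for idx in range(0, len(l)):
--         if l[idx] == '.':
--             counter += 1
--             if start == -1:
--                 start = idx
--         else:
--             if start != -1:
--                 out.append((start, counter))
--                 counter = 0
--                 start = -1
--
--     if start != -1:
--         out.append((start, counter))
--
--     return out
-- ===== SOURCE B (Python) =====
-- def list_spaces(l: list[str]) -> list[(int, int)]:  # start, length
--     out = []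
--     i = 0
--     n = len(l)
--     while i < n:
--         j = i
--         while j < n and l[j] == l[i]:
--             j += 1
--         if l[i] == '.':
--             out.append((i, j - i))
--         i = j
--     return out
-- ===== Notes on version B (the rewrite author's own statement) =====
-- stated objective: simpler
-- what changed: Replaces A's counter/start/-1-sentinel state machine with a run scanner: an inner loop consumes each maximal run of equal elements and emits (start, length) directly for '.'-runs, so no accumulator state or final flush is needed.
import Mathlib
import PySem

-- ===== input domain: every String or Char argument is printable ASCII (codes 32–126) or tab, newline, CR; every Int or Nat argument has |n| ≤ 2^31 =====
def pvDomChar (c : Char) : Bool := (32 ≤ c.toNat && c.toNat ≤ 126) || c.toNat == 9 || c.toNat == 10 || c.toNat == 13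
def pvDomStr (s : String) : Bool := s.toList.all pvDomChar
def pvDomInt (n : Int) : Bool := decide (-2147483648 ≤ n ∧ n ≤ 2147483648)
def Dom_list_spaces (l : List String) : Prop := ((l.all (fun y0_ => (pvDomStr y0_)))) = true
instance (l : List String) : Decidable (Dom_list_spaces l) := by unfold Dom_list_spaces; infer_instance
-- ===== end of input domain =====

-- B replaces A's counter/start/-1-sentinel state machine by a run scanner that consumes
-- each maximal run of equal elements and emits (start, length) for '.'-runs (simpler).

-- ===== PORT A =====
-- The for-loop over range(0, len(l)) with state (out, counter, start); l[idx] is in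
-- range for every idx the range produces, so pyGetD is exact here.
def list_spaces (l : List String) : List (Int × Int) :=
  let res := (PySem.List.pyRange 0 (l.length : Int) 1).foldl
    (fun (st : List (Int × Int) × Int × Int) idx =>
      let (out, counter, start) := st
      if PySem.List.pyGetD l idx "" == "." then
        (out, counter + 1, if start == -1 then idx else start)
      else
        if start != -1 then (out ++ [(start, counter)], (0 : Int), (-1 : Int))
        else (out, counter, start))
    ([], 0, -1)
  if res.2.2 != -1 then res.1 ++ [(res.2.2, res.2.1)] else res.1

-- ===== PORT B =====
-- B's outer while-loop over maximal runs: the inner 'while l[j] == l[i]' is the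
-- takeWhile/dropWhile split of the tail, j - i is the run length.
def list_spaces_go : List String → Int → List (Int × Int)
  | [], _ => []
  | x :: xs, pos =>
    let run := xs.takeWhile (fun y => y == x)
    let rest := xs.dropWhile (fun y => y == x)
    let n : Int := (run.length : Int) + 1
    if x == "." then (pos, n) :: list_spaces_go rest (pos + n)
    else list_spaces_go rest (pos + n)
  termination_by l _ => l.length
  decreasing_by
    all_goals exact Nat.lt_succ_of_le (List.length_dropWhile_le _ _)

def list_spaces_alt (l : List String) : List (Int × Int) := list_spaces_go l 0

-- ===== PRECONDITION & SPEC =====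
def Spec_list_spaces (l : List String) (out : List (Int × Int)) : Prop := out = list_spaces_alt l
instance (l : List String) (out : List (Int × Int)) : Decidable (Spec_list_spaces l out) := by unfold Spec_list_spaces; infer_instance

-- ===== CLAIM (what is proved, stated in full; the proofs are below) =====
def Claim_equal_list_spaces : Prop := ∀ (l : List String), Dom_list_spaces l → Spec_list_spaces l (list_spaces l)

-- ===== LEMMAS AND PROOFS =====

/-- A's loop body, as a step on (out, counter, start) fed with (idx, element). -/
def pvStepA (st : List (Int × Int) × Int × Int) (pr : Int × String) :
    List (Int × Int) × Int × Int :=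
  let (out, counter, start) := st
  let (idx, v) := pr
  if v == "." then (out, counter + 1, if start == -1 then idx else start)
  else
    if start != -1 then (out ++ [(start, counter)], 0, -1)
    else (out, counter, start)

/-- A's final flush. -/
def pvFlushA (st : List (Int × Int) × Int × Int) : List (Int × Int) :=
  if st.2.2 != -1 then st.1 ++ [(st.2.2, st.2.1)] else st.1

theorem list_spaces_eq_enum (l : List String) :
    list_spaces l = pvFlushA ((PySem.List.enumerate l 0).foldl pvStepA ([], 0, -1)) := by
  rw [PySem.List.enumerate_eq_map_pyRange (d := ""), List.foldl_map]
  rfl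

/-- Skipping one non-'.' element at a run boundary. -/
theorem go_cons_ne (y : String) (ys : List String) (q : Int) (hy : (y == ".") = false) :
    list_spaces_go (y :: ys) q = list_spaces_go ys (q + 1) := by
  match ys with
  | [] => simp [list_spaces_go, hy]
  | z :: zs =>
    by_cases hz : (z == y) = true
    · have hzy : z = y := eq_of_beq hz
      subst hzy
      rw [list_spaces_go, list_spaces_go]
      simp only [List.takeWhile_cons, List.dropWhile_cons, beq_self_eq_true, if_true,
        hy, Bool.false_eq_true, if_false]
      congr 1
      simp only [List.length_cons]
      push_cast
      ring
    · rw [list_spaces_go]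
      simp only [List.takeWhile_cons, List.dropWhile_cons, hz]
      simp [hy]

/-- Consuming a prefix of dots only bumps the counter once start is set. -/
theorem foldl_stepA_dots (t : List String) (ht : ∀ d ∈ t, d = ".") :
    ∀ (rest : List String) (p : Int) (out : List (Int × Int)) (c s : Int), s ≠ -1 →
      (PySem.List.enumerate (t ++ rest) p).foldl pvStepA (out, c, s)
        = (PySem.List.enumerate rest (p + t.length)).foldl pvStepA (out, c + t.length, s) := by
  induction t with
  | nil => intro rest p out c s _; simp
  | cons d ds ih =>
    intro rest p out c s hs
    have hd : d = "." := ht d (by simp)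
    have hds : ∀ x ∈ ds, x = "." := fun x hx => ht x (by simp [hx])
    rw [List.cons_append, PySem.List.enumerate_cons, List.foldl_cons]
    have hstep : pvStepA (out, c, s) (p, d) = (out, c + 1, s) := by
      simp [pvStepA, hd, beq_eq_false_iff_ne.mpr hs]
    rw [hstep, ih hds rest (p + 1) out (c + 1) s hs]
    have h1 : p + 1 + (ds.length : Int) = p + ((d :: ds).length : Int) := by
      simp only [List.length_cons]; push_cast; ring
    have h2 : c + 1 + (ds.length : Int) = c + ((d :: ds).length : Int) := by
      simp only [List.length_cons]; push_cast; ring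
    rw [h1, h2]

/-- Main invariant (length-bounded form): from a fresh (counter = 0, start = -1) state
at a nonnegative position p, A's remaining loop plus flush produces B's runs from p. -/
theorem mainAux (n : Nat) : ∀ (l : List String), l.length ≤ n →
    ∀ (p : Int) (out : List (Int × Int)), 0 ≤ p →
      pvFlushA ((PySem.List.enumerate l p).foldl pvStepA (out, 0, -1))
        = out ++ list_spaces_go l p := by
  induction n with
  | zero =>
    intro l hl p out hp
    have hnil : l = [] := List.eq_nil_of_length_eq_zero (by omega)
    subst hnil
    simp [pvFlushA, list_spaces_go]
  | succ n ih =>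
    intro l hl p out hp
    match l with
    | [] => simp [pvFlushA, list_spaces_go]
    | x :: xs =>
      by_cases hx : (x == ".") = true
      · have hx' : x = "." := eq_of_beq hx
        subst hx'
        have hp1 : p ≠ -1 := by omega
        have ht : ∀ d ∈ xs.takeWhile (fun y => y == "."), d = "." := by
          intro d hd
          have h2 := List.mem_takeWhile_imp hd
          simpa using h2
        have hgo : list_spaces_go ("." :: xs) p
            = (p, ((xs.takeWhile (fun y => y == ".")).length : Int) + 1)
              :: list_spaces_go (xs.dropWhile (fun y => y == "."))
                  (p + (((xs.takeWhile (fun y => y == ".")).length : Int) + 1)) := by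
          rw [list_spaces_go]; simp
        rw [PySem.List.enumerate_cons, List.foldl_cons]
        have hstep : pvStepA (out, 0, -1) (p, ".") = (out, 1, p) := by
          simp [pvStepA]
        rw [hstep, hgo]
        conv_lhs => rw [show xs = xs.takeWhile (fun y => y == ".") ++ xs.dropWhile (fun y => y == ".")
          from (List.takeWhile_append_dropWhile).symm]
        rw [foldl_stepA_dots _ ht _ (p + 1) out 1 p hp1]
        have e1 : (1 : Int) + (xs.takeWhile (fun y => y == ".")).length
            = ((xs.takeWhile (fun y => y == ".")).length : Int) + 1 := by ring
        have e2 : p + 1 + ((xs.takeWhile (fun y => y == ".")).length : Int)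
            = p + (((xs.takeWhile (fun y => y == ".")).length : Int) + 1) := by ring
        rw [e1, e2]
        have hlen : ((xs.dropWhile (fun y => y == ".")).length) ≤ xs.length :=
          List.length_dropWhile_le _ _
        generalize hR : xs.dropWhile (fun y => y == ".") = rest
        rw [hR] at hlen
        match rest with
        | [] =>
          simp [pvFlushA, list_spaces_go, hp1]
        | y :: ys =>
          have hy : (y == ".") = false := by
            have h3 := List.head?_dropWhile_not (fun y => y == ".") xs
            rw [hR] at h3
            simpa using h3
          have hys : ys.length ≤ n := by
            simp at hl hlen
            omega
          rw [PySem.List.enumerate_cons, List.foldl_cons]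
          have hstep2 : pvStepA (out, ((xs.takeWhile (fun y => y == ".")).length : Int) + 1, p)
              (p + (((xs.takeWhile (fun y => y == ".")).length : Int) + 1), y)
              = (out ++ [(p, ((xs.takeWhile (fun y => y == ".")).length : Int) + 1)], 0, -1) := by
            simp [pvStepA, hy, bne_iff_ne, hp1]
          rw [hstep2,
            ih ys hys (p + (((xs.takeWhile (fun y => y == ".")).length : Int) + 1) + 1) _ (by omega),
            go_cons_ne y ys _ hy]
          simp
      · have hx' : (x == ".") = false := by simpa using hx
        rw [PySem.List.enumerate_cons, List.foldl_cons]
        have hstep : pvStepA (out, 0, -1) (p, x) = (out, 0, -1) := by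
          simp [pvStepA, hx']
        have hxl : xs.length ≤ n := by simp at hl; omega
        rw [hstep, ih xs hxl (p + 1) out (by omega), go_cons_ne x xs p hx']

-- ===== VERDICT (by name: the statement is the Claim_ definition above) =====
theorem list_spaces_spec : Claim_equal_list_spaces := by
  intro l _
  unfold Spec_list_spaces list_spaces_alt
  rw [list_spaces_eq_enum, mainAux l.length l le_rfl 0 [] (by omega)]
  simp
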